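-- pv_equiv track=rewrite | github.com/mcamarketing/RekindleTest | backend/agents/crew/outreach_agent.py | _contains_spam_triggers
-- ===== SOURCE A (Python) =====
-- def _contains_spam_triggers(body: str) -> bool:
--     """Check if message contains common spam triggers"""
--     spam_triggers = [
--         'click here now',
--         'limited time offer',
--         'act now',
--         'free money',
--         '100% free',
--         'double your income',
--         'get paid',
--         'work from home',
--     ]
--
--     body_lower = body.lower()
--     return any(trigger in body_lower for trigger in spam_triggers)
-- ===== SOURCE B (Python) =====
-- def _contains_spam_triggers(body: str) -> bool:
--     """Check if message contains common spam triggers"""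
--     triggers = (
--         'click here now',
--         'limited time offer',
--         'act now',
--         'free money',
--         '100% free',
--         'double your income',
--         'get paid',
--         'work from home',
--     )
--     s = body.lower()
--     for i in range(len(s)):
--         for t in triggers:
--             if s.startswith(t, i):
--                 return True
--     return False
-- ===== Notes on version B (the rewrite author's own statement) =====
-- stated objective: alternative
-- what changed: B makes one left-to-right pass over the lowercased body, testing at each position whether any trigger starts there, instead of A's eight independent substring searches.
import Mathlib
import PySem

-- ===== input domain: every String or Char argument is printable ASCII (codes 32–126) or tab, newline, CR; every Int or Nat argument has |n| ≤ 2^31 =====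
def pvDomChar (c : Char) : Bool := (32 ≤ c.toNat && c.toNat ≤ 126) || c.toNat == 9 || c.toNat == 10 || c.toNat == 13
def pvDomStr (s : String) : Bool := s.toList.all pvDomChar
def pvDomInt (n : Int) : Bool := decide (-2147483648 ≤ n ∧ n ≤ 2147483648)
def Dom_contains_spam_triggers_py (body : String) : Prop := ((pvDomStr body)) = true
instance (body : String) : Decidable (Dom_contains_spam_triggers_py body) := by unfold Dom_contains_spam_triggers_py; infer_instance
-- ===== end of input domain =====

-- B replaces A's eight independent substring searches by one left-to-right scan that
-- tests, at each position of the lowercased body, whether some trigger starts there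
-- (alternative decomposition, same asymptotic cost).

-- ===== PORT A =====
-- literal transliteration of A: lowercase once, then any(trigger in body_lower)
def contains_spam_triggers_py (body : String) : Bool :=
  let spam_triggers : List String :=
    ["click here now", "limited time offer", "act now", "free money",
     "100% free", "double your income", "get paid", "work from home"]
  let body_lower := PySem.Str.lower body
  spam_triggers.any (fun trigger => PySem.Str.isIn trigger body_lower)

-- ===== PORT B =====
-- B-side trigger list, as character lists (Source B's tuple of strings)
def pvTriggersB : List (List Char) :=
  ["click here now", "limited time offer", "act now", "free money",
   "100% free", "double your income", "get paid", "work from home"].map String.toList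

-- Source B's scan: for each position i (= each suffix), does some trigger start there?
def pvScanB : List Char → Bool
  | [] => false
  | c :: rest => pvTriggersB.any (fun t => t.isPrefixOf (c :: rest)) || pvScanB rest

def contains_spam_triggers_py_alt (body : String) : Bool :=
  pvScanB (PySem.Chars.lower body.toList)

-- ===== PRECONDITION & SPEC =====
def Spec_contains_spam_triggers_py (body : String) (out : Bool) : Prop := out = contains_spam_triggers_py_alt body
instance (body : String) (out : Bool) : Decidable (Spec_contains_spam_triggers_py body out) := by unfold Spec_contains_spam_triggers_py; infer_instance

-- ===== CLAIM (what is proved, stated in full; the proofs are below) =====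
def Claim_equal_contains_spam_triggers_py : Prop := ∀ (body : String), Dom_contains_spam_triggers_py body → Spec_contains_spam_triggers_py body (contains_spam_triggers_py body)

-- ===== LEMMAS AND PROOFS =====

-- the scan finds a trigger iff some trigger is an infix of the scanned list
lemma pvScanB_iff (s : List Char) : pvScanB s = true ↔ ∃ t ∈ pvTriggersB, t <:+: s := by
  induction s with
  | nil =>
    simp only [pvScanB, Bool.false_eq_true, false_iff]
    rintro ⟨t, ht, hinf⟩
    have : t = [] := List.eq_nil_of_infix_nil hinf
    subst this
    revert ht; decide
  | cons c rest ih =>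
    simp only [pvScanB, Bool.or_eq_true, List.any_eq_true, ih, List.infix_cons_iff,
      List.isPrefixOf_iff_prefix]
    constructor
    · rintro (⟨t, ht, h⟩ | ⟨t, ht, h⟩)
      · exact ⟨t, ht, Or.inl h⟩
      · exact ⟨t, ht, Or.inr h⟩
    · rintro ⟨t, ht, h | h⟩
      · exact Or.inl ⟨t, ht, h⟩
      · exact Or.inr ⟨t, ht, h⟩

lemma ports_agree (body : String) :
    contains_spam_triggers_py body = contains_spam_triggers_py_alt body := by
  have := pvScanB_iff (PySem.Chars.lower body.toList)
  simp only [contains_spam_triggers_py, contains_spam_triggers_py_alt]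
  rw [Bool.eq_iff_iff, this]
  simp only [List.any_eq_true, PySem.Str.isIn_iff_infix, PySem.Str.toList_lower,
    pvTriggersB, List.mem_map, List.mem_cons, List.not_mem_nil, or_false]
  constructor
  · rintro ⟨t, ht, h⟩
    exact ⟨t.toList, ⟨t, ht, rfl⟩, h⟩
  · rintro ⟨tl, ⟨t, ht, rfl⟩, h⟩
    exact ⟨t, ht, h⟩

-- ===== VERDICT (by name: the statement is the Claim_ definition above) =====
theorem contains_spam_triggers_py_spec : Claim_equal_contains_spam_triggers_py := by
  intro body _
  exact ports_agree body
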